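-- pv_equiv track=rewrite | github.com/sunsikham/my_fv_project | fv/slots.py | get_dummy_token_labels_and_slot_map
-- ===== SOURCE A (Python) =====
-- from typing import Dict, List, Optional, Sequence, Tuple
--
-- def get_dummy_token_labels_and_slot_map(
--     n_icl_examples: int,
--     special_prefix: Optional[List[str]] = None,
--     special_suffix: Optional[List[str]] = None,
-- ) -> Tuple[List[str], Dict[str, int]]:
--     if n_icl_examples < 0:
--         raise ValueError("n_icl_examples must be >= 0")
--     dummy_labels: List[str] = []
--     slot_index_map: Dict[str, int] = {}
--
--     if special_prefix:
--         for label in special_prefix: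
--             slot_index_map[label] = len(dummy_labels)
--             dummy_labels.append(label)
--
--     for i in range(n_icl_examples):
--         dummy_labels.append("STATIC_Q")
--         slot_index_map[f"DEMO_{i}_IN"] = len(dummy_labels)
--         dummy_labels.append(f"DEMO_{i}_IN")
--         dummy_labels.append("STATIC_A")
--         slot_index_map[f"DEMO_{i}_OUT"] = len(dummy_labels)
--         dummy_labels.append(f"DEMO_{i}_OUT")
--         if i < n_icl_examples - 1:
--             dummy_labels.append("STATIC_SEP")
--
--     dummy_labels.append("STATIC_Q")
--     slot_index_map["QUERY_IN"] = len(dummy_labels)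
--     dummy_labels.append("QUERY_IN")
--
--     # QUERY_PRED aligns with the last input token (end of "A: " prefix).
--     slot_index_map["QUERY_PRED"] = len(dummy_labels)
--     dummy_labels.append("QUERY_PRED")
--
--     slot_index_map["QUERY_OUT"] = len(dummy_labels)
--     dummy_labels.append("QUERY_OUT")
--
--     if special_suffix:
--         for label in special_suffix:
--             slot_index_map[label] = len(dummy_labels)
--             dummy_labels.append(label)
--
--     return dummy_labels, slot_index_map
-- ===== SOURCE B (Python) =====
-- from typing import Dict, List, Optional, Tuple
--
-- def get_dummy_token_labels_and_slot_map(
--     n_icl_examples: int,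
--     special_prefix: Optional[List[str]] = None,
--     special_suffix: Optional[List[str]] = None,
-- ) -> Tuple[List[str], Dict[str, int]]:
--     if n_icl_examples < 0:
--         raise ValueError("n_icl_examples must be >= 0")
--     pre = list(special_prefix) if special_prefix else []
--     suf = list(special_suffix) if special_suffix else []
--
--     # Labels first, in sections: a separator after EVERY demo block, last one popped.
--     demo = [t for i in range(n_icl_examples)
--             for t in ("STATIC_Q", f"DEMO_{i}_IN", "STATIC_A", f"DEMO_{i}_OUT", "STATIC_SEP")]
--     if demo:
--         demo.pop()
--     query = ["STATIC_Q", "QUERY_IN", "QUERY_PRED", "QUERY_OUT"]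
--     labels = pre + demo + query + suf
--
--     # Slot map second, from closed-form index arithmetic.
--     p = len(pre)
--     q = p + len(demo)  # index of the query-block "STATIC_Q"
--     entries = (
--         [(lab, j) for j, lab in enumerate(pre)]
--         + [(f"DEMO_{i}_{io}", p + 5 * i + k)
--            for i in range(n_icl_examples) for io, k in (("IN", 1), ("OUT", 3))]
--         + [("QUERY_IN", q + 1), ("QUERY_PRED", q + 2), ("QUERY_OUT", q + 3)]
--         + [(lab, q + 4 + j) for j, lab in enumerate(suf)]
--     )
--     slot_index_map: Dict[str, int] = {}
--     for lab, j in entries: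
--         slot_index_map[lab] = j
--     return labels, slot_index_map
-- ===== Notes on version B (the rewrite author's own statement) =====
-- stated objective: alternative
-- what changed: B builds the full label list first in sections (appending a separator after every demo block and popping the last one) and then constructs the slot map in a separate second pass from closed-form index arithmetic (DEMO_i_IN at p+5i+1, DEMO_i_OUT at p+5i+3, query block at p+max(0,5n-1)), instead of A's single interleaved loop that records len(dummy_labels) at each append.
import Mathlib
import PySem

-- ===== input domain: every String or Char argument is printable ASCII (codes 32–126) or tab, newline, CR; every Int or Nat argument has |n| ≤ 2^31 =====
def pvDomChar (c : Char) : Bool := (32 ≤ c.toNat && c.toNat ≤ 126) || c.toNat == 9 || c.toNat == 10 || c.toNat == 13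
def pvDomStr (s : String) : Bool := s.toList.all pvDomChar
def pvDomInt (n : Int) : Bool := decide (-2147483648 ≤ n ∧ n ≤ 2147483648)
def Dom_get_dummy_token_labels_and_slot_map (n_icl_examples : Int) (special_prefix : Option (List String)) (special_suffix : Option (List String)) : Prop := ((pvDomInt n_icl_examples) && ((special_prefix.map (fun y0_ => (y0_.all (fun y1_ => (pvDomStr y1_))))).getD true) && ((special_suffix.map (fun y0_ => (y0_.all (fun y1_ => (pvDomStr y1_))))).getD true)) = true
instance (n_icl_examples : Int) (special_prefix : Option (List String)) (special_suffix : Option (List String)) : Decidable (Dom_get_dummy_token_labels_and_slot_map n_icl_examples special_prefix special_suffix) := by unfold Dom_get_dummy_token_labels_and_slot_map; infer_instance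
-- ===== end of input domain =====

-- B builds the label list first (separator after every demo block, last one dropped) and then the
-- slot map in a second pass from closed-form index arithmetic, instead of A's single interleaved loop.
-- Objective: alternative decomposition (same cost). A mutates nothing observable; neither does B.

-- ===== PORT A =====
-- one prefix/suffix-loop iteration: slot_index_map[label] = len(dummy_labels); dummy_labels.append(label)
def pvLabelStep (st : List String × PySem.Dict String Int) (lab : String) : List String × PySem.Dict String Int :=
  (st.1 ++ [lab], st.2.insert lab (st.1.length : Int))

-- one demo-loop iteration of A
def pvAStep (n_icl_examples : Int) (st : List String × PySem.Dict String Int) (i : Int) : List String × PySem.Dict String Int :=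
  let l1 := st.1 ++ ["STATIC_Q"]
  let kIn := "DEMO_" ++ PySem.Int.toStr i ++ "_IN"
  let m1 := st.2.insert kIn (l1.length : Int)
  let l2 := l1 ++ [kIn]
  let l3 := l2 ++ ["STATIC_A"]
  let kOut := "DEMO_" ++ PySem.Int.toStr i ++ "_OUT"
  let m2 := m1.insert kOut (l3.length : Int)
  let l4 := l3 ++ [kOut]
  let l5 := if i < n_icl_examples - 1 then l4 ++ ["STATIC_SEP"] else l4
  (l5, m2)

def get_dummy_token_labels_and_slot_map (n_icl_examples : Int) (special_prefix : Option (List String)) (special_suffix : Option (List String)) : List String × (List (String × Int)) :=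
  let st0 : List String × PySem.Dict String Int := ([], PySem.Dict.empty)
  let st1 := match special_prefix with
    | some pre => pre.foldl pvLabelStep st0
    | none => st0
  let st2 := (PySem.List.pyRange 0 n_icl_examples).foldl (pvAStep n_icl_examples) st1
  let l6 := st2.1 ++ ["STATIC_Q"]
  let m3 := st2.2.insert "QUERY_IN" (l6.length : Int)
  let l7 := l6 ++ ["QUERY_IN"]
  let m4 := m3.insert "QUERY_PRED" (l7.length : Int)
  let l8 := l7 ++ ["QUERY_PRED"]
  let m5 := m4.insert "QUERY_OUT" (l8.length : Int)
  let l9 := l8 ++ ["QUERY_OUT"]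
  let st3 := match special_suffix with
    | some suf => suf.foldl pvLabelStep (l9, m5)
    | none => (l9, m5)
  (st3.1, st3.2.items)

-- ===== PORT B =====
def pvIns (d : PySem.Dict String Int) (e : String × Int) : PySem.Dict String Int :=
  d.insert e.1 e.2

-- demo labels with a separator after EVERY block
def pvAltDemoLabels (n : Int) : List String :=
  (PySem.List.pyRange 0 n).flatMap (fun i =>
    ["STATIC_Q", "DEMO_" ++ PySem.Int.toStr i ++ "_IN", "STATIC_A",
     "DEMO_" ++ PySem.Int.toStr i ++ "_OUT", "STATIC_SEP"])

-- the slot-map entries, indices by closed-form arithmetic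
def pvAltEntries (n : Int) (pre suf : List String) (p q : Int) : List (String × Int) :=
  (PySem.List.enumerate pre).map (fun e => (e.2, e.1))
  ++ (PySem.List.pyRange 0 n).flatMap (fun i =>
       [("DEMO_" ++ PySem.Int.toStr i ++ "_IN", p + 5 * i + 1),
        ("DEMO_" ++ PySem.Int.toStr i ++ "_OUT", p + 5 * i + 3)])
  ++ [("QUERY_IN", q + 1), ("QUERY_PRED", q + 2), ("QUERY_OUT", q + 3)]
  ++ (PySem.List.enumerate suf).map (fun e => (e.2, q + 4 + e.1))

def get_dummy_token_labels_and_slot_map_alt (n_icl_examples : Int) (special_prefix : Option (List String)) (special_suffix : Option (List String)) : List String × (List (String × Int)) :=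
  let pre := match special_prefix with | some l => l | none => []
  let suf := match special_suffix with | some l => l | none => []
  let demo0 := pvAltDemoLabels n_icl_examples
  let demo := if demo0.isEmpty then demo0 else demo0.dropLast
  let query := ["STATIC_Q", "QUERY_IN", "QUERY_PRED", "QUERY_OUT"]
  let labels := pre ++ demo ++ query ++ suf
  let p : Int := pre.length
  let q : Int := p + demo.length
  let m := (pvAltEntries n_icl_examples pre suf p q).foldl pvIns PySem.Dict.empty
  (labels, m.items)

-- ===== PRECONDITION & SPEC =====
-- A raises ValueError for negative n_icl_examples; nothing else is excluded.
def Pre_get_dummy_token_labels_and_slot_map (n_icl_examples : Int) (special_prefix : Option (List String)) (special_suffix : Option (List String)) : Prop :=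
  0 ≤ n_icl_examples
instance (n_icl_examples : Int) (special_prefix : Option (List String)) (special_suffix : Option (List String)) : Decidable (Pre_get_dummy_token_labels_and_slot_map n_icl_examples special_prefix special_suffix) := by unfold Pre_get_dummy_token_labels_and_slot_map; infer_instance

def pvWitness_get_dummy_token_labels_and_slot_map : Int × Option (List String) × Option (List String) :=
  (2, some ["P"], some ["S"])

def Spec_get_dummy_token_labels_and_slot_map (n_icl_examples : Int) (special_prefix : Option (List String)) (special_suffix : Option (List String)) (out : List String × (List (String × Int))) : Prop := out = get_dummy_token_labels_and_slot_map_alt n_icl_examples special_prefix special_suffix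
instance (n_icl_examples : Int) (special_prefix : Option (List String)) (special_suffix : Option (List String)) (out : List String × (List (String × Int))) : Decidable (Spec_get_dummy_token_labels_and_slot_map n_icl_examples special_prefix special_suffix out) := by unfold Spec_get_dummy_token_labels_and_slot_map; infer_instance

-- ===== CLAIM (what is proved, stated in full; the proofs are below) =====
def Claim_equal_get_dummy_token_labels_and_slot_map : Prop := ∀ (n_icl_examples : Int) (special_prefix : Option (List String)) (special_suffix : Option (List String)), Dom_get_dummy_token_labels_and_slot_map n_icl_examples special_prefix special_suffix → Pre_get_dummy_token_labels_and_slot_map n_icl_examples special_prefix special_suffix → Spec_get_dummy_token_labels_and_slot_map n_icl_examples special_prefix special_suffix (get_dummy_token_labels_and_slot_map n_icl_examples special_prefix special_suffix)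

-- ===== LEMMAS AND PROOFS =====

theorem pv_enumerate_add {α : Type} (l : List α) (s : Int) :
    PySem.List.enumerate l s = (PySem.List.enumerate l 0).map (fun e => (s + e.1, e.2)) := by
  induction l generalizing s with
  | nil => simp [PySem.List.enumerate]
  | cons x t ih =>
    simp only [PySem.List.enumerate, List.map_cons]
    rw [ih (s + 1), show (0:Int) + 1 = 1 from rfl, ih 1, List.map_map]
    congr 1
    · simp
    · exact List.map_congr_left (fun e _ => by simp; ring)

theorem pv_prefix_fold (l : List String) (L0 : List String) (m0 : PySem.Dict String Int) :
    l.foldl pvLabelStep (L0, m0)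
      = (L0 ++ l,
         ((PySem.List.enumerate l (L0.length : Int)).map (fun e => (e.2, e.1))).foldl pvIns m0) := by
  induction l generalizing L0 m0 with
  | nil => simp [PySem.List.enumerate]
  | cons x t ih =>
    simp only [List.foldl_cons, pvLabelStep, PySem.List.enumerate, List.map_cons]
    rw [ih]
    simp [pvIns]

theorem pv_flat_len (k : Nat) :
    ((PySem.List.pyRange 0 (k : Int)).flatMap (fun i =>
        ["STATIC_Q", "DEMO_" ++ PySem.Int.toStr i ++ "_IN", "STATIC_A",
         "DEMO_" ++ PySem.Int.toStr i ++ "_OUT", "STATIC_SEP"])).length = 5 * k := by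
  induction k with
  | zero => decide
  | succ k ih =>
    rw [show ((k + 1 : Nat) : Int) = (k : Int) + 1 by push_cast; ring,
        PySem.List.pyRange_one_succ_right (by positivity), List.flatMap_append]
    simp [ih]
    omega

theorem pv_demo_fold (n : Int) (L0 : List String) (m0 : PySem.Dict String Int) (k : Nat)
    (hk : (k : Int) < n) :
    (PySem.List.pyRange 0 k).foldl (pvAStep n) (L0, m0)
      = (L0 ++ (PySem.List.pyRange 0 k).flatMap (fun i =>
            ["STATIC_Q", "DEMO_" ++ PySem.Int.toStr i ++ "_IN", "STATIC_A",
             "DEMO_" ++ PySem.Int.toStr i ++ "_OUT", "STATIC_SEP"]),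
         ((PySem.List.pyRange 0 k).flatMap (fun i =>
            [("DEMO_" ++ PySem.Int.toStr i ++ "_IN", (L0.length : Int) + 5 * i + 1),
             ("DEMO_" ++ PySem.Int.toStr i ++ "_OUT", (L0.length : Int) + 5 * i + 3)])).foldl pvIns m0) := by
  induction k with
  | zero => simp
  | succ k ih =>
    have hk' : (k : Int) < n := by push_cast at hk; omega
    have hcond : (k : Int) < n - 1 := by push_cast at hk; omega
    rw [show ((k + 1 : Nat) : Int) = (k : Int) + 1 by push_cast; ring,
        PySem.List.pyRange_one_succ_right (by positivity),
        List.foldl_append, List.flatMap_append, List.flatMap_append, ih hk']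
    simp only [List.foldl_cons, List.foldl_nil, List.flatMap_cons, List.flatMap_nil,
      List.append_nil, pvAStep, if_pos hcond]
    refine Prod.ext ?_ ?_
    · simp [List.append_assoc]
    · simp [pvIns, List.length_append]
      ring_nf

theorem pv_suffix_map (suf : List String) (s : Int) :
    (PySem.List.enumerate suf s).map (fun e => (e.2, e.1))
      = (PySem.List.enumerate suf).map (fun e => (e.2, s + e.1)) := by
  rw [pv_enumerate_add, List.map_map]; rfl

theorem pv_central (k : Nat) (pre suf : List String) :
    get_dummy_token_labels_and_slot_map (k : Int) (some pre) (some suf)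
      = get_dummy_token_labels_and_slot_map_alt (k : Int) (some pre) (some suf) := by
  unfold get_dummy_token_labels_and_slot_map get_dummy_token_labels_and_slot_map_alt
  dsimp only []
  rw [pv_prefix_fold pre [] PySem.Dict.empty]
  cases k with
  | zero =>
    rw [pv_prefix_fold]
    simp only [pvAltDemoLabels, pvAltEntries, pv_suffix_map,
      show PySem.List.pyRange (0:Int) ((0:Nat):Int) = [] from rfl,
      List.flatMap_nil, List.isEmpty_nil, if_pos, List.foldl_nil, List.append_nil,
      List.foldl_append, List.foldl_cons, List.length_append, List.length_nil, List.length_cons,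
      List.nil_append, List.append_assoc, pvIns]
    push_cast
    ring_nf
    rfl
  | succ m =>
    have h0 : (0:Int) ≤ (m:Int) := by positivity
    simp only [pvAltDemoLabels, pvAltEntries]
    rw [show ((m + 1 : Nat) : Int) = (m : Int) + 1 by push_cast; ring,
        PySem.List.pyRange_one_succ_right h0, List.foldl_append,
        pv_demo_fold _ _ _ m (by omega)]
    simp only [List.foldl_cons, List.foldl_nil, pvAStep, List.flatMap_append, List.flatMap_cons,
      List.flatMap_nil, List.append_nil]
    rw [if_neg (by omega : ¬ ((m:Int) < (m:Int) + 1 - 1))]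
    rw [show (PySem.List.pyRange 0 (m:Int)).flatMap (fun i =>
          ["STATIC_Q", "DEMO_" ++ PySem.Int.toStr i ++ "_IN", "STATIC_A",
           "DEMO_" ++ PySem.Int.toStr i ++ "_OUT", "STATIC_SEP"]) ++
          ["STATIC_Q", "DEMO_" ++ PySem.Int.toStr (m:Int) ++ "_IN", "STATIC_A",
           "DEMO_" ++ PySem.Int.toStr (m:Int) ++ "_OUT", "STATIC_SEP"]
        = ((PySem.List.pyRange 0 (m:Int)).flatMap (fun i =>
          ["STATIC_Q", "DEMO_" ++ PySem.Int.toStr i ++ "_IN", "STATIC_A",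
           "DEMO_" ++ PySem.Int.toStr i ++ "_OUT", "STATIC_SEP"]) ++
          ["STATIC_Q", "DEMO_" ++ PySem.Int.toStr (m:Int) ++ "_IN", "STATIC_A",
           "DEMO_" ++ PySem.Int.toStr (m:Int) ++ "_OUT"]) ++ ["STATIC_SEP"]
        from by simp]
    rw [List.dropLast_concat, if_neg (by simp)]
    rw [pv_prefix_fold]
    simp only [pv_suffix_map, List.foldl_append, List.foldl_cons, List.foldl_nil,
      List.length_append, pv_flat_len, List.length_cons, List.length_nil,
      List.nil_append, List.append_assoc, pvIns]
    push_cast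
    ring_nf
    rfl

-- ===== VERDICT (by name: the statement is the Claim_ definition above) =====
theorem get_dummy_token_labels_and_slot_map_spec : Claim_equal_get_dummy_token_labels_and_slot_map := by
  intro n sp ss _ hpre
  unfold Spec_get_dummy_token_labels_and_slot_map
  obtain ⟨k, rfl⟩ := Int.eq_ofNat_of_zero_le hpre
  cases sp with
  | none =>
    cases ss with
    | none => exact pv_central k [] []
    | some l' => exact pv_central k [] l'
  | some l =>
    cases ss with
    | none => exact pv_central k l []
    | some l' => exact pv_central k l l'
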